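-- pv_equiv track=rewrite | github.com/shachar31/The-dynamic-parcel-routing-with-endogenous-service-times-in-a-hyper-connected-network-problem | create_data.py | add_path
-- ===== SOURCE A (Python) =====
-- def add_path(path):
--     data = []
--     target = path[-1][1]
--     line_number_up, curr_node = path[0]
--
--     path_edges = list(zip(path, path[1:]))
--     for e in path_edges:
--         line_1, node = e[0]
--         line_2, node = e[1]
--         if line_1 != line_2:
--             station_down = node
--             data.append([curr_node, target, line_number_up, station_down])
--             curr_node = node
--             line_number_up = line_2
--     station_down = target
--     data.append([curr_node, target, line_number_up, station_down])
--     return data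
-- ===== SOURCE B (Python) =====
-- def add_path(path):
--     target = path[-1][1]
--     # group the path into maximal runs of equal line, keeping each run's (line, first_node)
--     runs = []
--     for line, node in path:
--         if not runs or runs[-1][0] != line:
--             runs.append((line, node))
--     # one segment per run: the down-station is the next run's first node, or target for the last run
--     out = [[first, target, line, nxt] for (line, first), (_, nxt) in zip(runs, runs[1:])]
--     last_line, last_first = runs[-1]
--     out.append([last_first, target, last_line, target])
--     return out
-- ===== Notes on version B (the rewrite author's own statement) =====
-- stated objective: idiomatic
-- what changed: Replaces the adjacent-pair zip scan with mutable loop state by a group-then-emit decomposition: first collect the (line, first_node) of each maximal run of equal line, then emit one segment per run with the next run's first node (or target) as the down-station.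
-- outside the precondition, e.g. on add_path([]): A raises IndexError, B raises IndexError
import Mathlib
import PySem

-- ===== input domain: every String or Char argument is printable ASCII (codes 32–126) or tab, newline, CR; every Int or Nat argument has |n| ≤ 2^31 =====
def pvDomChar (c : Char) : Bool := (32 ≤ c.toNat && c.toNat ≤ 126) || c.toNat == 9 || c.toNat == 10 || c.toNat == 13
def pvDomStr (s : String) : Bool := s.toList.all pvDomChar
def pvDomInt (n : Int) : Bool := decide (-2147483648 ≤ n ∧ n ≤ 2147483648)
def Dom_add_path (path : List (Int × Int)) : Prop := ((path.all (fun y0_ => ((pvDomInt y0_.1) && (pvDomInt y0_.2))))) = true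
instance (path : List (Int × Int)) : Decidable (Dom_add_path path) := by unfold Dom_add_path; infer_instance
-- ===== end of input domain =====

-- B replaces A's adjacent-pair scan with carried loop state by a group-runs-then-emit decomposition (idiomatic; same O(n) cost).

-- ===== PORT A =====
-- A's loop body over the zipped edge list; state is (data, curr_node, line_number_up)
def stepA (target : Int) (s : List (List Int) × Int × Int) (e : (Int × Int) × (Int × Int)) :
    List (List Int) × Int × Int :=
  if e.1.1 ≠ e.2.1 then (s.1 ++ [[s.2.1, target, s.2.2, e.2.2]], e.2.2, e.2.1) else s

def add_path (path : List (Int × Int)) : List (List Int) :=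
  match path with
  | [] => []   -- Python A raises IndexError here (path[-1]); excluded by Pre_
  | (l0, n0) :: rest =>
    let target := (((l0, n0) :: rest).getLast (by simp)).2
    let s := (List.zip ((l0, n0) :: rest) rest).foldl (stepA target) ([], n0, l0)
    s.1 ++ [[s.2.1, target, s.2.2, target]]

-- ===== PORT B =====
-- B's grouping loop body: append (line, node) when runs is empty or the last run's line differs
def stepRuns (acc : List (Int × Int)) (p : Int × Int) : List (Int × Int) :=
  match acc.getLast? with
  | none => acc ++ [p]
  | some q => if q.1 ≠ p.1 then acc ++ [p] else acc

def add_path_alt (path : List (Int × Int)) : List (List Int) :=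
  match path with
  | [] => []   -- Python B raises IndexError here (path[-1]); excluded by Pre_
  | p0 :: rest =>
    let target := ((p0 :: rest).getLast (by simp)).2
    let runs := (p0 :: rest).foldl stepRuns []
    let out := (runs.zip runs.tail).map (fun r => [r.1.2, target, r.1.1, r.2.2])
    match runs.getLast? with
    | some q => out ++ [[q.2, target, q.1, target]]
    | none => out

-- ===== PRECONDITION & SPEC =====
-- Pre_ excludes only the empty path, on which A raises IndexError (path[-1]).
def Pre_add_path (path : List (Int × Int)) : Prop := path ≠ []
instance (path : List (Int × Int)) : Decidable (Pre_add_path path) := by unfold Pre_add_path; infer_instance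
def pvWitness_add_path : (List (Int × Int)) := [(1, 2), (1, 3), (2, 4)]

def Spec_add_path (path : List (Int × Int)) (out : List (List Int)) : Prop := out = add_path_alt path
instance (path : List (Int × Int)) (out : List (List Int)) : Decidable (Spec_add_path path out) := by unfold Spec_add_path; infer_instance

-- ===== CLAIM (what is proved, stated in full; the proofs are below) =====
def Claim_equal_add_path : Prop := ∀ (path : List (Int × Int)), Dom_add_path path → Pre_add_path path → Spec_add_path path (add_path path)

-- ===== LEMMAS AND PROOFS =====

-- Reference recursive description of the emitted segments, starting a run at line lu, first node c
def segs (t c lu : Int) : List (Int × Int) → List (List Int)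
  | [] => [[c, t, lu, t]]
  | (l2, n2) :: rest =>
      if lu ≠ l2 then [c, t, lu, n2] :: segs t n2 l2 rest else segs t c lu rest

-- A-side: same recursion but with the carried state decoupled from the head line l1
def segsA (t c lu l1 : Int) : List (Int × Int) → List (List Int)
  | [] => [[c, t, lu, t]]
  | (l2, n2) :: rest =>
      if l1 ≠ l2 then [c, t, lu, n2] :: segsA t n2 l2 l2 rest else segsA t c lu l2 rest

def finishA (t : Int) (s : List (List Int) × Int × Int) : List (List Int) :=
  s.1 ++ [[s.2.1, t, s.2.2, t]]

theorem aFold_eq (t : Int) : ∀ (rest : List (Int × Int)) (data : List (List Int)) (c lu l1 n1 : Int),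
    finishA t ((List.zip ((l1, n1) :: rest) rest).foldl (stepA t) (data, c, lu)) =
      data ++ segsA t c lu l1 rest := by
  intro rest
  induction rest with
  | nil => intro data c lu l1 n1; simp [finishA, segsA]
  | cons p rest ih =>
      intro data c lu l1 n1
      obtain ⟨l2, n2⟩ := p
      by_cases h : l1 = l2
      · subst h
        simp only [List.zip_cons_cons, List.foldl_cons]
        rw [show stepA t (data, c, lu) ((l1, n1), (l1, n2)) = (data, c, lu) from by
              simp [stepA]]
        rw [ih data c lu l1 n2]
        simp [segsA]
      · simp only [List.zip_cons_cons, List.foldl_cons]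
        rw [show stepA t (data, c, lu) ((l1, n1), (l2, n2)) =
              (data ++ [[c, t, lu, n2]], n2, l2) from by simp [stepA, h]]
        rw [ih (data ++ [[c, t, lu, n2]]) n2 l2 l2 n2]
        simp [segsA, h]

theorem segsA_eq_segs (t : Int) : ∀ (rest : List (Int × Int)) (c lu : Int),
    segsA t c lu lu rest = segs t c lu rest := by
  intro rest
  induction rest with
  | nil => intro c lu; rfl
  | cons p rest ih =>
      intro c lu
      obtain ⟨l2, n2⟩ := p
      by_cases h : lu = l2
      · subst h; simp [segsA, segs, ih]
      · simp [segsA, segs, h, ih]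

-- B-side: recursive description of the run list
def runsOf (p : Int × Int) : List (Int × Int) → List (Int × Int)
  | [] => [p]
  | q :: rest => if p.1 = q.1 then runsOf p rest else p :: runsOf q rest

theorem runsOf_cons_form (p : Int × Int) (xs : List (Int × Int)) :
    ∃ rs, runsOf p xs = p :: rs := by
  induction xs generalizing p with
  | nil => exact ⟨[], rfl⟩
  | cons q rest ih =>
      simp only [runsOf]
      split
      · exact ih p
      · exact ⟨runsOf q rest, rfl⟩

theorem bFold_eq (p : Int × Int) : ∀ (xs : List (Int × Int)) (acc : List (Int × Int)),
    (xs.foldl stepRuns (acc ++ [p])) = acc ++ runsOf p xs := by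
  intro xs
  induction xs generalizing p with
  | nil => intro acc; simp [runsOf]
  | cons q rest ih =>
      intro acc
      by_cases h : p.1 = q.1
      · rw [List.foldl_cons,
          show stepRuns (acc ++ [p]) q = acc ++ [p] from by
            simp [stepRuns, List.getLast?_append, h]]
        rw [ih p acc]
        simp [runsOf, h]
      · rw [List.foldl_cons,
          show stepRuns (acc ++ [p]) q = (acc ++ [p]) ++ [q] from by
            simp [stepRuns, List.getLast?_append, h]]
        rw [ih q (acc ++ [p])]
        simp [runsOf, h]

-- the per-run emission, recursively
def emitL (t : Int) : List (Int × Int) → List (List Int)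
  | [] => []
  | [p] => [[p.2, t, p.1, t]]
  | p :: q :: rs => [p.2, t, p.1, q.2] :: emitL t (q :: rs)

theorem emitL_eq (t : Int) : ∀ (rs : List (Int × Int)) (p : Int × Int),
    (((p :: rs).zip rs).map (fun r => [r.1.2, t, r.1.1, r.2.2])) ++
      (match (p :: rs).getLast? with
       | some q => [[q.2, t, q.1, t]]
       | none => ([] : List (List Int))) = emitL t (p :: rs) := by
  intro rs
  induction rs with
  | nil => intro p; simp [emitL]
  | cons q rs ih =>
      intro p
      rw [show (p :: q :: rs).getLast? = (q :: rs).getLast? from List.getLast?_cons_cons ..]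
      simp only [List.zip_cons_cons, List.map_cons, List.cons_append, emitL]
      rw [ih q]

theorem emitL_runsOf (t : Int) : ∀ (xs : List (Int × Int)) (p : Int × Int),
    emitL t (runsOf p xs) = segs t p.2 p.1 xs := by
  intro xs
  induction xs with
  | nil => intro p; rfl
  | cons q rest ih =>
      intro p
      obtain ⟨l2, n2⟩ := q
      by_cases h : p.1 = l2
      · rw [show runsOf p ((l2, n2) :: rest) = runsOf p rest from by simp [runsOf, h]]
        rw [ih p]
        simp only [segs]
        rw [if_neg (by simpa using h)]
      · rw [show runsOf p ((l2, n2) :: rest) = p :: runsOf (l2, n2) rest from by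
              simp [runsOf, h]]
        obtain ⟨rs, hr⟩ := runsOf_cons_form (l2, n2) rest
        rw [hr]
        have ihq := ih (l2, n2)
        rw [hr] at ihq
        simp only [emitL, segs, if_pos (by simpa using h)]
        rw [ihq]

theorem match_getLast_distrib (t : Int) (out : List (List Int)) (l : List (Int × Int)) :
    (match l.getLast? with
     | some q => out ++ [[q.2, t, q.1, t]]
     | none => out) =
    out ++ (match l.getLast? with
     | some q => [[q.2, t, q.1, t]]
     | none => ([] : List (List Int))) := by
  cases l.getLast? <;> simp

theorem add_path_cons (l0 n0 : Int) (rest : List (Int × Int)) :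
    add_path ((l0, n0) :: rest) =
      segs ((((l0, n0) :: rest).getLast (by simp)).2) n0 l0 rest := by
  show finishA ((((l0, n0) :: rest).getLast (by simp)).2)
      ((List.zip ((l0, n0) :: rest) rest).foldl
        (stepA ((((l0, n0) :: rest).getLast (by simp)).2)) ([], n0, l0)) = _
  rw [aFold_eq]
  simp [segsA_eq_segs]

theorem add_path_alt_cons (l0 n0 : Int) (rest : List (Int × Int)) :
    add_path_alt ((l0, n0) :: rest) =
      segs ((((l0, n0) :: rest).getLast (by simp)).2) n0 l0 rest := by
  have hruns : ((l0, n0) :: rest).foldl stepRuns [] = runsOf (l0, n0) rest := by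
    rw [List.foldl_cons, show stepRuns [] (l0, n0) = [] ++ [(l0, n0)] from by simp [stepRuns]]
    rw [bFold_eq]
    simp
  show (let runs := ((l0, n0) :: rest).foldl stepRuns []
        let out := (runs.zip runs.tail).map
          (fun r => [r.1.2, (((l0, n0) :: rest).getLast (by simp)).2, r.1.1, r.2.2])
        match runs.getLast? with
        | some q => out ++ [[q.2, (((l0, n0) :: rest).getLast (by simp)).2, q.1,
            (((l0, n0) :: rest).getLast (by simp)).2]]
        | none => out) = _
  simp only [hruns]
  rw [match_getLast_distrib]
  obtain ⟨rs, hr⟩ := runsOf_cons_form (l0, n0) rest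
  rw [hr, List.tail_cons, emitL_eq, ← hr, emitL_runsOf]

-- ===== VERDICT (by name: the statement is the Claim_ definition above) =====
theorem add_path_spec : Claim_equal_add_path := by
  intro path _ hpre
  match path with
  | [] => exact absurd rfl hpre
  | (l0, n0) :: rest =>
      show add_path _ = add_path_alt _
      rw [add_path_cons, add_path_alt_cons]
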